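-- pv_equiv track=rewrite | github.com/kiipo0623/Algorithm-2021 | 우테코/4.py | solution
-- ===== SOURCE A (Python) =====
-- def solution(s):
--     answer = []
--     n = len(s)
--
--     before = s[0]
--     count = 1
--
--     for i in range(1, n):
--         if before == s[i]:
--             count += 1
--         else:
--             answer.append(count)
--             before = s[i]
--             count = 1
--
--     answer.append(count)
--
--     if s[0] == s[n-1] and len(answer)>1:  # 처음과 끝이 같은 경우
--         new = answer[0] + answer[-1]
--         del answer[0]
--         del answer[-1]
--         answer.append(new)
--
--     return sorted(answer)
-- ===== SOURCE B (Python) =====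
-- def _runs(t):
--     # peel the leading run off the front of t until nothing is left
--     counts = []
--     while t:
--         i = 1
--         while i < len(t) and t[i] == t[0]:
--             i += 1
--         counts.append(i)
--         t = t[i:]
--     return counts
--
--
-- def solution(s):
--     first = s[0]
--     if all(c == first for c in s):
--         return [len(s)]
--     if s[-1] == first:
--         # circular run: rotate so the string starts at the first change point;
--         # then no wrap-around merge is ever needed
--         k = next(i for i, c in enumerate(s) if c != first)
--         s = s[k:] + s[:k]
--     return sorted(_runs(s))
-- ===== Notes on version B (the rewrite author's own statement) =====
-- stated objective: alternative
-- what changed: Instead of one stateful counting pass followed by a first/last-run merge of the result list, B eliminates the wrap-around merge up front by rotating the string to its first change point (constant strings handled as a direct special case) and then peels leading runs off the rotated string; Pre_ excludes only the empty string, on which both A and B raise IndexError at s[0].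
import Mathlib
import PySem

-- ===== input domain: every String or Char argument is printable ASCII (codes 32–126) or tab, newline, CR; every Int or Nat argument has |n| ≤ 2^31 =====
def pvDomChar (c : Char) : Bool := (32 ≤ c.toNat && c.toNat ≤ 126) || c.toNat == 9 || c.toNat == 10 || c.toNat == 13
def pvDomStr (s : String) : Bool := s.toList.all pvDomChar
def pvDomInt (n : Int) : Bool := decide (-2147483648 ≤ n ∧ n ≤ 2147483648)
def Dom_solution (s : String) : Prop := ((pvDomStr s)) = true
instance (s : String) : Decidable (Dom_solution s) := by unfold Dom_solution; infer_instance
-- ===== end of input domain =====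

-- B removes A's wrap-around merge step by rotating the string to its first change point
-- (constant strings as a direct special case) and computes run lengths by peeling leading
-- runs off the rotated string; objective: an alternative decomposition (not faster).

-- ===== PORT A =====
-- s[i] (in-range on every admitted input; the default is never used under Pre_)
def pvChr (cs : List Char) (i : Int) : Char := (PySem.List.pyGet? cs i).getD ' '

-- the 'for i in range(1, n)' loop of A over the state (answer, before, count)
def pvLoopA (cs : List Char) (n : Int) : List Int × Char × Int :=
  (PySem.List.pyRange 1 n 1).foldl
    (fun acc i =>
      if acc.2.1 = pvChr cs i then (acc.1, acc.2.1, acc.2.2 + 1)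
      else (acc.1 ++ [acc.2.2], pvChr cs i, 1))
    ([], pvChr cs 0, 1)

def solution (s : String) : List Int :=
  let cs := s.toList
  let n : Int := cs.length
  let st := pvLoopA cs n
  let answer := st.1 ++ [st.2.2]
  let answer' :=
    if pvChr cs 0 = pvChr cs (n - 1) ∧ 1 < answer.length then
      -- new = answer[0] + answer[-1]; del answer[0]; del answer[-1]; answer.append(new)
      (answer.drop 1).dropLast ++
        [(PySem.List.pyGet? answer 0).getD 0 + (PySem.List.pyGet? answer (-1)).getD 0]
    else answer
  PySem.List.sorted answer' (fun x => x) false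

-- ===== PORT B =====
-- the 'while i < len(t) and t[i] == t[0]' scan of _runs: number of further chars equal to the head
def pvLead (c : Char) : List Char → Nat
  | [] => 0
  | x :: xs => if x = c then pvLead c xs + 1 else 0

-- _runs: the 'while t:' loop — append the leading-run length i to counts, continue on t[i:]
def pvRunsGo (counts : List Int) : List Char → List Int
  | [] => counts
  | c :: rest =>
      pvRunsGo (counts ++ [((pvLead c rest + 1 : Nat) : Int)]) ((c :: rest).drop (pvLead c rest + 1))
termination_by t => t.length
decreasing_by simp

def solution_alt (s : String) : List Int :=
  let cs := s.toList
  let first := pvChr cs 0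
  if cs.all (fun c => c = first) then [(cs.length : Int)]
  else
    let cs' :=
      if pvChr cs (-1) = first then
        -- k = next(i for i, c in enumerate(s) if c != first); s = s[k:] + s[:k]
        let k := cs.findIdx (fun c => c ≠ first)
        cs.drop k ++ cs.take k
      else cs
    PySem.List.sorted (pvRunsGo [] cs') (fun x => x) false

-- ===== PRECONDITION & SPEC =====
-- A evaluates s[0] unconditionally, so it raises IndexError exactly on the empty string
-- (and B does too); Pre_ excludes only that input.
def Pre_solution (s : String) : Prop := s ≠ ""
instance (s : String) : Decidable (Pre_solution s) := by unfold Pre_solution; infer_instance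
def pvWitness_solution : String := "aabcaa"

def Spec_solution (s : String) (out : List Int) : Prop := out = solution_alt s
instance (s : String) (out : List Int) : Decidable (Spec_solution s out) := by unfold Spec_solution; infer_instance

-- ===== CLAIM (what is proved, stated in full; the proofs are below) =====
def Claim_equal_solution : Prop := ∀ (s : String), Dom_solution s → Pre_solution s → Spec_solution s (solution s)

-- ===== LEMMAS AND PROOFS =====

-- the run-length list of a string, as a plain recursion (proof-side view of B's loop)
def pvRuns : List Char → List Int
  | [] => []
  | c :: rest =>
      ((pvLead c rest + 1 : Nat) : Int) :: pvRuns ((c :: rest).drop (pvLead c rest + 1))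
termination_by t => t.length
decreasing_by simp

theorem pvRunsGo_eq (t : List Char) (counts : List Int) :
    pvRunsGo counts t = counts ++ pvRuns t := by
  induction hn : t.length using Nat.strong_induction_on generalizing t counts with
  | _ n ih =>
    cases t with
    | nil => rw [pvRunsGo, pvRuns.eq_def]; simp
    | cons c rest =>
        simp only [List.length_cons] at hn
        rw [pvRunsGo, pvRuns.eq_def,
          ih ((c :: rest).drop (pvLead c rest + 1)).length (by simp; omega) _ _ rfl]
        simp

theorem pvLead_all (c : Char) (v : List Char) (h : v.all (· = c) = true) :
    pvLead c v = v.length := by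
  induction v with
  | nil => simp [pvLead]
  | cons x xs ih =>
      simp only [List.all_cons, Bool.and_eq_true, decide_eq_true_eq] at h
      simp [pvLead, h.1, ih h.2]

theorem pvLead_lt (c : Char) (v : List Char) (h : ¬ v.all (· = c) = true) :
    pvLead c v < v.length := by
  induction v with
  | nil => simp at h
  | cons x xs ih =>
      simp only [List.all_cons, Bool.and_eq_true, decide_eq_true_eq] at h
      by_cases hx : x = c
      · have := ih (fun ha => h ⟨hx, ha⟩)
        simp [pvLead, hx]; omega
      · simp [pvLead, hx]

theorem pvLead_append_all (c : Char) (v w : List Char) (h : v.all (· = c) = true) :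
    pvLead c (v ++ w) = v.length + pvLead c w := by
  induction v with
  | nil => simp
  | cons x xs ih =>
      simp only [List.all_cons, Bool.and_eq_true, decide_eq_true_eq] at h
      simp [pvLead, h.1, ih h.2]; omega

theorem pvLead_append_not (c : Char) (v w : List Char) (h : ¬ v.all (· = c) = true) :
    pvLead c (v ++ w) = pvLead c v := by
  induction v with
  | nil => simp at h
  | cons x xs ih =>
      simp only [List.all_cons, Bool.and_eq_true, decide_eq_true_eq] at h
      by_cases hx : x = c
      · simp [pvLead, hx, ih (fun ha => h ⟨hx, ha⟩)]
      · simp [pvLead, hx]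

theorem pvLead_replicate (c : Char) (k : Nat) : pvLead c (List.replicate k c) = k := by
  induction k with
  | zero => simp [pvLead]
  | succ k ih => simp [List.replicate_succ, pvLead, ih]

theorem pvTake_lead (c : Char) (v : List Char) :
    v.take (pvLead c v) = List.replicate (pvLead c v) c := by
  induction v with
  | nil => simp [pvLead]
  | cons x xs ih =>
      by_cases hx : x = c
      · simp [pvLead, hx, List.replicate_succ, ih]
      · simp [pvLead, hx]

theorem pvFindIdx_eq_lead (c : Char) (v : List Char) :
    v.findIdx (fun x => x ≠ c) = pvLead c v := by
  induction v with
  | nil => simp [pvLead]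
  | cons x xs ih =>
      by_cases hx : x = c
      · simpa [List.findIdx_cons, hx, pvLead] using ih
      · simp [List.findIdx_cons, hx, pvLead]

theorem pvRuns_cons (c : Char) (rest : List Char) :
    pvRuns (c :: rest) =
      ((pvLead c rest + 1 : Nat) : Int) :: pvRuns ((c :: rest).drop (pvLead c rest + 1)) := by
  rw [pvRuns.eq_def]

theorem pvRuns_nil : pvRuns [] = [] := by rw [pvRuns.eq_def]

theorem pvRuns_singleton (c : Char) : pvRuns [c] = [1] := by
  rw [pvRuns_cons]
  simp [pvLead, pvRuns_nil]

theorem pvDropLast_lastD {α : Type} (l : List α) (h : l ≠ []) (d : α) :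
    l.dropLast ++ [l.getLastD d] = l := by
  rw [List.getLastD_eq_getLast?, List.getLast?_eq_getLast_of_ne_nil h, Option.getD_some]
  exact List.dropLast_concat_getLast h

theorem pvRuns_ne_nil (t : List Char) (h : t ≠ []) : pvRuns t ≠ [] := by
  cases t with
  | nil => simp at h
  | cons c rest => simp [pvRuns_cons]

theorem pvRuns_all (c : Char) (v : List Char) (h : v.all (· = c) = true) :
    pvRuns (c :: v) = [((v.length + 1 : Nat) : Int)] := by
  have hL := pvLead_all c v h
  rw [pvRuns_cons, hL]
  rw [List.drop_eq_nil_of_le (by simp), pvRuns_nil]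

theorem pvRuns_length_lt (c : Char) (v : List Char) (h : ¬ v.all (· = c) = true) :
    1 < (pvRuns (c :: v)).length := by
  have hlt := pvLead_lt c v h
  have hne : (c :: v).drop (pvLead c v + 1) ≠ [] := by
    simp only [List.drop_succ_cons, ne_eq, List.drop_eq_nil_iff]
    omega
  have := pvRuns_ne_nil _ hne
  rw [pvRuns_cons]
  have := List.length_pos_iff.mpr this
  simp only [List.length_cons]
  omega

theorem pvLastD_congr {α : Type} (l : List α) (h : l ≠ []) (d d' : α) :
    l.getLastD d = l.getLastD d' := by
  rw [List.getLastD_eq_getLast?, List.getLastD_eq_getLast?, List.getLast?_eq_getLast_of_ne_nil h]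
  rfl

theorem pvLastD_append {α : Type} (x w : List α) (h : w ≠ []) (d : α) :
    (x ++ w).getLastD d = w.getLastD d := by
  rw [List.getLastD_eq_getLast?, List.getLastD_eq_getLast?, List.getLast?_append_of_ne_nil x h]

theorem pvLastD_all (a : Char) (v : List Char) (d : Char) (h : v.all (· = a) = true) :
    (a :: v).getLastD d = a := by
  have hne : (a :: v) ≠ [] := by simp
  have hmem := List.getLast_mem hne
  have hall : ((a :: v).all (· = a)) = true := by
    simp only [List.all_cons, Bool.and_eq_true]
    exact ⟨by simp, h⟩
  have := List.all_eq_true.mp hall _ hmem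
  rw [List.getLastD_eq_getLast?, List.getLast?_eq_getLast_of_ne_nil hne]
  simpa using this

-- last run extended: runs (u ++ c^k) = runs u with its last entry increased by k
theorem pvRuns_append_rep (u : List Char) (c : Char) (k : Nat)
    (hu : u ≠ []) (hl : u.getLastD ' ' = c) :
    pvRuns (u ++ List.replicate k c) =
      (pvRuns u).dropLast ++ [(pvRuns u).getLastD 0 + (k : Int)] := by
  induction hn : u.length using Nat.strong_induction_on generalizing u with
  | _ n ih =>
    cases u with
    | nil => simp at hu
    | cons a v =>
      by_cases hv : v.all (· = a) = true
      · have hca : a = c := by rw [← pvLastD_all a v ' ' hv, hl]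
        subst hca
        have hLL : pvLead a (v ++ List.replicate k a) = v.length + k := by
          rw [pvLead_append_all a v _ hv, pvLead_replicate]
        rw [List.cons_append, pvRuns_cons, hLL, pvRuns_all a v hv]
        rw [List.drop_eq_nil_of_le (by simp), pvRuns_nil]
        simp
        ring
      · simp only [List.length_cons] at hn
        have hlt := pvLead_lt a v hv
        have hL : pvLead a (v ++ List.replicate k c) = pvLead a v := pvLead_append_not a v _ hv
        have hvne : v ≠ [] := by intro h; subst h; simp at hlt
        have hwne : v.drop (pvLead a v) ≠ [] := by
          simp only [ne_eq, List.drop_eq_nil_iff]; omega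
        have hwlast : (v.drop (pvLead a v)).getLastD ' ' = c := by
          rw [← hl, List.getLastD_cons]
          conv_rhs => rw [← List.take_append_drop (pvLead a v) v]
          rw [pvLastD_append _ _ hwne, pvLastD_congr _ hwne ' ' a]
        have hdrop : (a :: (v ++ List.replicate k c)).drop (pvLead a v + 1) =
            v.drop (pvLead a v) ++ List.replicate k c := by
          rw [List.drop_succ_cons, List.drop_append_of_le_length (by omega)]
        rw [List.cons_append, pvRuns_cons, hL, hdrop,
          ih (v.length - pvLead a v) (by omega) _ hwne hwlast
            (by simp only [List.length_drop])]
        have hdrop2 : (a :: v).drop (pvLead a v + 1) = v.drop (pvLead a v) :=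
          List.drop_succ_cons ..
        rw [pvRuns_cons, hdrop2]
        have hrne : pvRuns (v.drop (pvLead a v)) ≠ [] := pvRuns_ne_nil _ hwne
        rw [List.dropLast_cons_of_ne_nil hrne, List.getLastD_cons]
        simp [List.getLastD_eq_getLast?, List.getLast?_eq_getLast_of_ne_nil hrne]

-- appending a char different from the last char opens a new run
theorem pvRuns_snoc_ne (u : List Char) (c : Char)
    (hu : u ≠ []) (hl : u.getLastD ' ' ≠ c) :
    pvRuns (u ++ [c]) = pvRuns u ++ [1] := by
  induction hn : u.length using Nat.strong_induction_on generalizing u with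
  | _ n ih =>
    cases u with
    | nil => simp at hu
    | cons a v =>
      simp only [List.length_cons] at hn
      have hruns1 : pvRuns [c] = [1] := by
        rw [pvRuns_cons]; simp [pvLead, pvRuns_nil]
      by_cases hv : v.all (· = a) = true
      · have hac : a ≠ c := by rw [← pvLastD_all a v ' ' hv]; exact hl
        have hLL : pvLead a (v ++ [c]) = v.length := by
          rw [pvLead_append_all a v _ hv]
          simp [pvLead, hac.symm]
        have hdrop : (a :: (v ++ [c])).drop (v.length + 1) = [c] := by
          rw [List.drop_succ_cons, List.drop_append_of_le_length (by omega)]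
          simp
        rw [List.cons_append, pvRuns_cons, hLL, hdrop, hruns1, pvRuns_all a v hv]
        simp
      · have hlt := pvLead_lt a v hv
        have hL : pvLead a (v ++ [c]) = pvLead a v := pvLead_append_not a v _ hv
        have hwne : v.drop (pvLead a v) ≠ [] := by
          simp only [ne_eq, List.drop_eq_nil_iff]; omega
        have hwlast : (v.drop (pvLead a v)).getLastD ' ' ≠ c := by
          intro hbad
          apply hl
          rw [List.getLastD_cons]
          conv_lhs => rw [← List.take_append_drop (pvLead a v) v]
          rw [pvLastD_append _ _ hwne, pvLastD_congr _ hwne a ' ', hbad]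
        have hdrop : (a :: (v ++ [c])).drop (pvLead a v + 1) =
            v.drop (pvLead a v) ++ [c] := by
          rw [List.drop_succ_cons, List.drop_append_of_le_length (by omega)]
        rw [List.cons_append, pvRuns_cons, hL, hdrop,
          ih (v.length - pvLead a v) (by omega) _ hwne hwlast
            (by simp only [List.length_drop])]
        rw [pvRuns_cons, List.drop_succ_cons]
        simp

theorem pvChr_nat (cs : List Char) (m : Nat) (h : m < cs.length) :
    pvChr cs (m : Int) = cs[m] := by
  simp [pvChr, h]

theorem pvGetLastD_take (cs : List Char) (m : Nat) (d : Char) (h1 : 1 ≤ m) (h2 : m ≤ cs.length) :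
    (cs.take m).getLastD d = cs[m-1]'(by omega) := by
  have hcs : cs ≠ [] := by
    intro h
    subst h
    simp at h2
    omega
  have hne : cs.take m ≠ [] := by
    simp only [ne_eq, List.take_eq_nil_iff, not_or]
    exact ⟨by omega, hcs⟩
  rw [List.getLastD_eq_getLast?, List.getLast?_eq_getLast_of_ne_nil hne, Option.getD_some,
    List.getLast_eq_getElem]
  simp only [List.getElem_take, List.length_take]
  congr 1
  omega

-- A's loop state after the first m-1 iterations, in terms of the runs of the length-m prefix
theorem pvLoopA_eq (cs : List Char) (m : Nat) (h1 : 1 ≤ m) (h2 : m ≤ cs.length) :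
    pvLoopA cs (m : Int) =
      ((pvRuns (cs.take m)).dropLast, pvChr cs ((m : Int) - 1), (pvRuns (cs.take m)).getLastD 0) := by
  induction m, h1 using Nat.le_induction with
  | base =>
      have h0 : PySem.List.pyRange 1 ((1:Nat):Int) 1 = [] := PySem.List.pyRange_one_eq_nil (by norm_num)
      cases cs with
      | nil => simp at h2
      | cons c rest =>
          rw [pvLoopA, h0]
          simp [pvRuns_singleton]
  | succ m hm ih =>
      have hmlt : m < cs.length := by omega
      have ihv := ih (by omega)
      have hr : PySem.List.pyRange 1 ((m+1:Nat):Int) 1 = PySem.List.pyRange 1 (m:Int) 1 ++ [(m:Int)] := by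
        push_cast
        exact PySem.List.pyRange_one_succ_right (by exact_mod_cast hm)
      have hstep : pvLoopA cs ((m+1 : Nat) : Int) =
          (fun (acc : List Int × Char × Int) (i : Int) =>
            if acc.2.1 = pvChr cs i then (acc.1, acc.2.1, acc.2.2 + 1)
            else (acc.1 ++ [acc.2.2], pvChr cs i, 1)) (pvLoopA cs (m : Int)) (m : Int) := by
        rw [pvLoopA, pvLoopA, hr, List.foldl_append]
        simp
      have htake : cs.take (m+1) = cs.take m ++ [cs[m]] := List.take_succ_eq_append_getElem hmlt
      have htkne : cs.take m ≠ [] := by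
        simp only [ne_eq, List.take_eq_nil_iff, not_or]
        constructor
        · omega
        · intro h; subst h; simp at hmlt
      have hRne : pvRuns (cs.take m) ≠ [] := pvRuns_ne_nil _ htkne
      have hbefore : pvChr cs ((m : Int) - 1) = (cs.take m).getLastD ' ' := by
        have hc : ((m : Int) - 1) = ((m - 1 : Nat) : Int) := by omega
        rw [hc, pvChr_nat cs (m-1) (by omega), pvGetLastD_take cs m ' ' hm (by omega)]
      have hcur : pvChr cs (m : Int) = cs[m] := pvChr_nat cs m hmlt
      have hnext : pvChr cs (((m+1 : Nat) : Int) - 1) = pvChr cs (m : Int) := by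
        congr 1
        push_cast
        ring
      rw [hstep, ihv]
      beta_reduce
      by_cases hbc : pvChr cs ((m : Int) - 1) = pvChr cs (m : Int)
      · have hlast : (cs.take m).getLastD ' ' = cs[m] := by rw [← hbefore, hbc, hcur]
        have hrep : pvRuns (cs.take (m+1)) =
            (pvRuns (cs.take m)).dropLast ++ [(pvRuns (cs.take m)).getLastD 0 + (1:Int)] := by
          rw [htake, ← List.replicate_one (a := cs[m])]
          exact pvRuns_append_rep _ _ 1 htkne hlast
        rw [if_pos hbc, hrep, hnext, List.dropLast_concat, List.getLastD_concat, ← hbc]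
      · have hlast : (cs.take m).getLastD ' ' ≠ cs[m] := by rw [← hbefore, ← hcur]; exact hbc
        have hrep : pvRuns (cs.take (m+1)) = pvRuns (cs.take m) ++ [1] := by
          rw [htake]
          exact pvRuns_snoc_ne _ _ htkne hlast
        rw [if_neg hbc, hrep, hnext, List.dropLast_concat, List.getLastD_concat,
          pvDropLast_lastD _ hRne 0]

theorem pvChr_last (cs : List Char) (h : cs ≠ []) :
    pvChr cs ((cs.length : Int) - 1) = pvChr cs (-1) := by
  cases cs with
  | nil => simp at h
  | cons a t =>
      have h1 : ((a :: t).length : Int) - 1 = ((t.length : Nat) : Int) := by simp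
      rw [pvChr, pvChr, h1, PySem.List.pyGet?_natCast, PySem.List.pyGet?_neg_one]
      rw [List.getLast?_eq_getElem?]
      simp

theorem pvChr_zero (c : Char) (v : List Char) : pvChr (c :: v) 0 = c := by
  have := pvChr_nat (c :: v) 0 (by simp)
  simpa using this

theorem pvLast?_cons {α : Type} (a : α) (l : List α) (h : l ≠ []) :
    (a :: l).getLast? = l.getLast? := by
  cases l with
  | nil => exact absurd rfl h
  | cons b t => simp [List.getLast?_cons_cons]

theorem pvChr_neg_one (cs : List Char) : pvChr cs (-1) = cs.getLastD ' ' := by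
  rw [pvChr, PySem.List.pyGet?_neg_one, List.getLastD_eq_getLast?]

theorem pvSorted_singleton (x : Int) :
    PySem.List.sorted [x] (fun y => y) false = [x] := by
  exact PySem.List.sorted_eq_self_of_pairwise _ _ (List.pairwise_singleton _ _)

-- A's full pre-sort list is the run-length list of the string
theorem pvAnswer_eq_runs (cs : List Char) (h : cs ≠ []) :
    (pvLoopA cs (cs.length : Int)).1 ++ [(pvLoopA cs (cs.length : Int)).2.2] = pvRuns cs := by
  have hlen : 1 ≤ cs.length := List.length_pos_iff.mpr h
  rw [pvLoopA_eq cs cs.length hlen (le_refl _)]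
  simp only [List.take_length]
  exact pvDropLast_lastD _ (pvRuns_ne_nil _ h) 0

-- ===== VERDICT (by name: the statement is the Claim_ definition above) =====
theorem solution_spec : Claim_equal_solution := by
  intro s _hdom hpre
  have hcs : s.toList ≠ [] := by
    intro h
    apply hpre
    simpa [← String.toList_eq_nil_iff] using h
  show solution s = solution_alt s
  rw [solution, solution_alt]
  generalize s.toList = cs at hcs ⊢
  cases cs with
  | nil => simp at hcs
  | cons c v =>
    simp only []
    rw [pvRunsGo_eq, List.nil_append]
    have h0 : pvChr (c :: v) 0 = c := pvChr_zero c v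
    have hans := pvAnswer_eq_runs (c :: v) hcs
    have hn1 : pvChr (c :: v) (((c :: v).length : Int) - 1) = (c :: v).getLastD ' ' := by
      rw [pvChr_last _ hcs, pvChr_neg_one]
    rw [hans, h0, hn1]
    by_cases hvall : v.all (· = c) = true
    · -- constant string: one run, no merge needed on either side
      have hallB : ((c :: v).all (fun x => x = c)) = true := by
        simp only [List.all_cons, Bool.and_eq_true]
        exact ⟨by simp, hvall⟩
      rw [if_pos hallB, pvRuns_all c v hvall,
        if_neg (show ¬(c = (c :: v).getLastD ' ' ∧
          1 < ([((v.length + 1 : Nat) : Int)]).length) by simp), pvSorted_singleton]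
      simp
    · have hallB : ¬ ((c :: v).all (fun x => x = c)) = true := by
        simp only [List.all_cons, Bool.and_eq_true]
        intro hb
        exact hvall hb.2
      rw [if_neg hallB]
      have hRlen : 1 < (pvRuns (c :: v)).length := pvRuns_length_lt c v hvall
      set L := pvLead c v with hL
      have hlt := pvLead_lt c v hvall
      have hwne : v.drop L ≠ [] := by
        simp only [ne_eq, List.drop_eq_nil_iff]; omega
      have hR : pvRuns (c :: v) = ((L + 1 : Nat) : Int) :: pvRuns (v.drop L) := by
        rw [pvRuns_cons, List.drop_succ_cons]
      have hR1ne : pvRuns (v.drop L) ≠ [] := pvRuns_ne_nil _ hwne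
      rw [pvChr_neg_one]
      by_cases hend : (c :: v).getLastD ' ' = c
      · -- wrap-around case: A merges first and last run; B rotates to the first change point
        rw [if_pos ⟨hend.symm, hRlen⟩, if_pos hend]
        have hwlast : (v.drop L).getLastD ' ' = c := by
          rw [← hend, List.getLastD_cons]
          conv_rhs => rw [← List.take_append_drop L v]
          rw [pvLastD_append _ _ hwne]
          exact pvLastD_congr _ hwne ' ' c
        have hidx : (c :: v).findIdx (fun x => x ≠ c) = L + 1 := by
          rw [List.findIdx_cons]
          have hfi := pvFindIdx_eq_lead c v
          simp only [ne_eq, decide_not] at hfi ⊢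
          simp [hfi]
          exact hL.symm
        rw [hidx]
        have htk : (c :: v).take (L + 1) = List.replicate (L + 1) c := by
          rw [List.take_succ_cons, pvTake_lead, ← List.replicate_succ]
        have hdp : (c :: v).drop (L + 1) = v.drop L := List.drop_succ_cons ..
        rw [htk, hdp, pvRuns_append_rep _ c (L + 1) hwne hwlast]
        -- A's merged list equals B's rotated run list
        congr 1
        rw [hR, List.drop_one, List.tail_cons]
        congr 1
        have hg0 : (PySem.List.pyGet? (((L + 1 : Nat) : Int) :: pvRuns (v.drop L)) 0).getD 0 =
            ((L + 1 : Nat) : Int) := by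
          simp [PySem.List.pyGet?, PySem.List.pyIdx?]
        have hgl : (PySem.List.pyGet? (((L + 1 : Nat) : Int) :: pvRuns (v.drop L)) (-1)).getD 0 =
            (pvRuns (v.drop L)).getLastD 0 := by
          rw [PySem.List.pyGet?_neg_one, pvLast?_cons _ _ hR1ne,
            ← List.getLastD_eq_getLast?]
        rw [hg0, hgl]
        ring_nf
      · -- no wrap-around: neither merges nor rotates
        rw [if_neg (fun hb => hend hb.1.symm), if_neg hend]
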